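-- pv_equiv track=rewrite | github.com/hassansaeed14/Hey-Goku | agents/memory/learning_agent.py | extract_fact
-- ===== SOURCE A (Python) =====
-- def extract_fact(user_input):
--     text = str(user_input).lower()
--
--     patterns = [
--         "my favorite",
--         "i like",
--         "i love",
--         "i prefer",
--         "my name is",
--         "i usually",
--         "i hate",
--         "i want",
--         "i study",
--         "i am learning"
--     ]
--
--     for pattern in patterns:
--         if pattern in text:
--             return str(user_input).strip()
--
--     return None
-- ===== SOURCE B (Python) =====
-- _PATTERNS = (
--     "my favorite",
--     "i like",
--     "i love",
--     "i prefer",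
--     "my name is",
--     "i usually",
--     "i hate",
--     "i want",
--     "i study",
--     "i am learning",
-- )
--
--
-- def extract_fact(user_input):
--     text = str(user_input).lower()
--     for i in range(len(text)):
--         if text.startswith(_PATTERNS, i):
--             return str(user_input).strip()
--     return None
-- ===== Notes on version B (the rewrite author's own statement) =====
-- stated objective: alternative
-- what changed: B makes a single left-to-right pass over the lowercased text, testing all ten trigger phrases at each position via one startswith(tuple, i) call, instead of A's pattern-major loop of ten independent full substring scans.
import Mathlib
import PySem

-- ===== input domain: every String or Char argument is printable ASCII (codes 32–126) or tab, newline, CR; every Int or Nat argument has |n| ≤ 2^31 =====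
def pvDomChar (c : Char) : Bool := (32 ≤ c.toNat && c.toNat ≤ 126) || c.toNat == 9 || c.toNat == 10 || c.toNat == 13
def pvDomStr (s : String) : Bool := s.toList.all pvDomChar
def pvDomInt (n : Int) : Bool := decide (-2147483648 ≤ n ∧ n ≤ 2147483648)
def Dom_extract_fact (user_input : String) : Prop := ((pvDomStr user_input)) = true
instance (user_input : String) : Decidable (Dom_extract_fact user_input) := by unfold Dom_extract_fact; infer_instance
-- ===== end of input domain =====

-- B replaces A's pattern-major loop of ten full substring scans by one position-major
-- pass over the text that tests all ten phrases at each index (alternative, same cost).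

-- ===== PORT A =====
-- for pattern in patterns: if pattern in text: return str(user_input).strip()
def aLoop (orig : String) (text : String) : List String → Option String
  | [] => none
  | p :: ps =>
      if PySem.Str.isIn p text then some (PySem.Str.strip orig)
      else aLoop orig text ps

def extract_fact (user_input : String) : Option String :=
  let text := PySem.Str.lower user_input
  aLoop user_input text
    ["my favorite", "i like", "i love", "i prefer", "my name is",
     "i usually", "i hate", "i want", "i study", "i am learning"]

-- ===== PORT B =====
def pvPatterns : List String :=
  ["my favorite", "i like", "i love", "i prefer", "my name is",
   "i usually", "i hate", "i want", "i study", "i am learning"]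

-- for i in range(len(text)): if text.startswith(_PATTERNS, i): …
-- the scan over positions i is recursion over the suffix text[i:], since
-- text.startswith(p, i) is exactly 'text[i:] starts with p'
def bScan (orig : String) : List Char → Option String
  | [] => none
  | c :: rest =>
      if pvPatterns.any (fun p => PySem.Chars.startswith (c :: rest) p.toList) then
        some (PySem.Str.strip orig)
      else bScan orig rest

def extract_fact_alt (user_input : String) : Option String :=
  bScan user_input (PySem.Str.lower user_input).toList

-- ===== PRECONDITION & SPEC =====
def Spec_extract_fact (user_input : String) (out : Option String) : Prop := out = extract_fact_alt user_input
instance (user_input : String) (out : Option String) : Decidable (Spec_extract_fact user_input out) := by unfold Spec_extract_fact; infer_instance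

-- ===== CLAIM (what is proved, stated in full; the proofs are below) =====
def Claim_equal_extract_fact : Prop := ∀ (user_input : String), Dom_extract_fact user_input → Spec_extract_fact user_input (extract_fact user_input)

-- ===== LEMMAS AND PROOFS =====

-- A's loop returns 'some (strip orig)' iff some pattern occurs in text
theorem aLoop_eq (orig text : String) (ps : List String) :
    aLoop orig text ps =
      if ps.any (fun p => PySem.Chars.isIn p.toList text.toList) then
        some (PySem.Str.strip orig)
      else none := by
  induction ps with
  | nil => simp [aLoop]
  | cons p ps ih =>
      simp only [aLoop, List.any_cons, PySem.Str.isIn_eq, ih]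
      by_cases h : PySem.Chars.isIn p.toList text.toList = true <;> simp [h]

-- membership at the head position vs membership in the tail
theorem isIn_cons (p : List Char) (c : Char) (rest : List Char) :
    PySem.Chars.isIn p (c :: rest) =
      (PySem.Chars.startswith (c :: rest) p || PySem.Chars.isIn p rest) := by
  rw [Bool.eq_iff_iff]
  simp only [Bool.or_eq_true, PySem.Chars.isIn_iff_infix,
    PySem.Chars.startswith_iff, List.infix_cons_iff]

theorem any_or_distrib (l : List String) (f g : String → Bool) :
    (l.any fun x => f x || g x) = (l.any f || l.any g) := by
  induction l with
  | nil => rfl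
  | cons x xs ih => simp [List.any_cons, ih, Bool.or_assoc, Bool.or_left_comm]

-- B's scan returns 'some (strip orig)' iff some pattern occurs in the text
theorem bScan_eq (orig : String) (l : List Char) :
    bScan orig l =
      if pvPatterns.any (fun p => PySem.Chars.isIn p.toList l) then
        some (PySem.Str.strip orig)
      else none := by
  induction l with
  | nil => simp [bScan]; decide
  | cons c rest ih =>
      have h : (pvPatterns.any fun p => PySem.Chars.isIn p.toList (c :: rest)) =
          ((pvPatterns.any fun p => PySem.Chars.startswith (c :: rest) p.toList) ||
           (pvPatterns.any fun p => PySem.Chars.isIn p.toList rest)) := by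
        rw [← any_or_distrib]
        simp only [isIn_cons]
      rw [bScan, ih, h]
      by_cases h1 : (pvPatterns.any fun p => PySem.Chars.startswith (c :: rest) p.toList) = true <;>
        by_cases h2 : (pvPatterns.any fun p => PySem.Chars.isIn p.toList rest) = true <;>
        simp [h1, h2]

-- ===== VERDICT (by name: the statement is the Claim_ definition above) =====
theorem extract_fact_spec : Claim_equal_extract_fact := by
  intro user_input _
  unfold Spec_extract_fact extract_fact extract_fact_alt
  rw [aLoop_eq, bScan_eq]
  rfl
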